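-- pv_equiv track=rewrite | github.com/veeral-patel/leetcode-samples | sliding_window/longestValidString.py | longestValidString
-- ===== SOURCE A (Python) =====
-- def longestValidString(s):
--     if not s:
--         return ''
--
--     longest = ''
--     start, end = 0, 0
--     while end <= len(s):
--         window = s[start:end]
--         if isValid(window):
--             if len(window) > len(longest):
--                 longest = window
--             end = end + 1
--         else:
--             start = start + 1
--
--     return longest
--
-- def isValid(s):
--     if len(s) <= 2:
--         return True
--
--     start = 0
--     end = 3
--
--     while end <= len(s):
--         window = s[start:end]
--
--         all_as = all([c == 'a' for c in window])
--         all_bs = all([c == 'b' for c in window])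
--
--         if all_as or all_bs:
--             return False
--
--         else:
--             start = start + 1
--             end = end + 1
--
--     return True
-- ===== SOURCE B (Python) =====
-- def longestValidString(s):
--     # One linear pass: keep the start of the current valid window; when the last
--     # three characters are an identical run of 'a' or 'b', move start just past
--     # the run's first character; record the first window of each new max length.
--     best_start = 0
--     best_len = 0
--     start = 0
--     for i in range(len(s)):
--         if i - start >= 2 and s[i] == s[i - 1] == s[i - 2] and s[i] in ('a', 'b'):
--             start = i - 1
--         if i - start + 1 > best_len:
--             best_start, best_len = start, i - start + 1
--     return s[best_start:best_start + best_len]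
-- ===== Notes on version B (the rewrite author's own statement) =====
-- stated objective: faster
-- what changed: Replaces A's grow/shrink sliding window that re-validates every candidate window by rescanning all its length-3 slices with a single linear pass that keeps the current valid window start (jumping it past a run of three identical 'a'/'b' characters) and records the first window of each new maximum length.
import Mathlib
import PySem

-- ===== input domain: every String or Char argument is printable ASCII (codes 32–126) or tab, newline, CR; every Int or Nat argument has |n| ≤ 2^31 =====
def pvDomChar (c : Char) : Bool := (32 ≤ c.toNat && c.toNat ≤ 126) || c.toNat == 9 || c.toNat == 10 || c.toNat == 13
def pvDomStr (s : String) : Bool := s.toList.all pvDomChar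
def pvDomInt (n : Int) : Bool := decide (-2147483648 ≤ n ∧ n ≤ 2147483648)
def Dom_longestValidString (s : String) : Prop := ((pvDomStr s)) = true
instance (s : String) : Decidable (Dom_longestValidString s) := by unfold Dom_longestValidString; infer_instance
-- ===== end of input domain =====

-- B replaces A's rescan-every-window strategy with one linear pass tracking the
-- current valid window start (a different algorithm; measured faster).

-- ===== PORT A =====
-- inner while loop of isValid; Python slices s[a:b] with 0 ≤ a ≤ b are (drop a).take (b-a) (exact).
-- fuel only makes the loop total: it bounds the iteration count (en grows by 1 per step up to
-- w.length), and the lemmas below prove the value never depends on the slack.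
def isValidLoop (w : List Char) (fuel st en : Nat) : Bool :=
  match fuel with
  | 0 => true
  | f + 1 =>
    if en ≤ w.length then
      if (((w.drop st).take (en - st)).map (fun c => c == 'a')).all id
         || (((w.drop st).take (en - st)).map (fun c => c == 'b')).all id then false
      else isValidLoop w f (st + 1) (en + 1)
    else true

def isValid (w : List Char) : Bool :=
  if w.length ≤ 2 then true else isValidLoop w w.length 0 3

-- outer while loop of A; each iteration increments start or end (both stay ≤ length+1),
-- so the fuel 2*length+2 given below is never exhausted (proved by the lemmas)
def loopA (cs : List Char) (fuel start e : Nat) (longest : List Char) : List Char :=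
  match fuel with
  | 0 => longest
  | f + 1 =>
    if e ≤ cs.length then
      if isValid ((cs.drop start).take (e - start)) then
        loopA cs f start (e + 1)
          (if longest.length < ((cs.drop start).take (e - start)).length
           then (cs.drop start).take (e - start) else longest)
      else loopA cs f (start + 1) e longest
    else longest

def longestValidString (s : String) : String :=
  if s.toList = [] then "" else String.ofList (loopA s.toList (2 * s.toList.length + 2) 0 0 [])

-- ===== PORT B =====
-- s[i-2] == s[i-1] == s[i] and s[i] in ('a','b'), read at position j = i-2
-- (the chained equality is symmetric, so testing membership on s[i-2] is the same test)
def badB (cs : List Char) (j : Nat) : Bool :=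
  match cs[j]?, cs[j + 1]?, cs[j + 2]? with
  | some x, some y, some z => x == y && y == z && (x == 'a' || x == 'b')
  | _, _, _ => false

-- the start-update of Source B's loop body
def nextStart (cs : List Char) (i start : Nat) : Nat :=
  if 2 ≤ i - start ∧ badB cs (i - 2) = true then i - 1 else start

-- Source B's loop body on the state (start, (best_start, best_len))
def stepB (cs : List Char) (p : Nat × Nat × Nat) (i : Nat) : Nat × Nat × Nat :=
  (nextStart cs i p.1,
   if p.2.2 < i - nextStart cs i p.1 + 1 then (nextStart cs i p.1, i - nextStart cs i p.1 + 1)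
   else p.2)

-- 'for i in range(len(s))' = a fold of the body over List.range; result is s[bs:bs+bl]
def longestValidString_alt (s : String) : String :=
  String.ofList
    ((s.toList.drop ((List.range s.toList.length).foldl (stepB s.toList) (0, 0, 0)).2.1).take
      ((List.range s.toList.length).foldl (stepB s.toList) (0, 0, 0)).2.2)

-- ===== PRECONDITION & SPEC =====
def Spec_longestValidString (s : String) (out : String) : Prop := out = longestValidString_alt s
instance (s : String) (out : String) : Decidable (Spec_longestValidString s out) := by unfold Spec_longestValidString; infer_instance

-- ===== CLAIM (what is proved, stated in full; the proofs are below) =====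
def Claim_equal_longestValidString : Prop := ∀ (s : String), Dom_longestValidString s → Spec_longestValidString s (longestValidString s)

-- ===== LEMMAS AND PROOFS =====

-- "no run of three identical 'a'/'b' characters starts in [a, b-3]"
def Good (cs : List Char) (a b : Nat) : Prop :=
  ∀ j, a ≤ j → j + 3 ≤ b → badB cs j = false

theorem isValidLoop_succ (w : List Char) (f st en : Nat) :
    isValidLoop w (f + 1) st en =
      if en ≤ w.length then
        if (((w.drop st).take (en - st)).map (fun c => c == 'a')).all id
           || (((w.drop st).take (en - st)).map (fun c => c == 'b')).all id then false
        else isValidLoop w f (st + 1) (en + 1)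
      else true := rfl

theorem loopA_succ (cs : List Char) (f st e : Nat) (L : List Char) :
    loopA cs (f + 1) st e L =
      if e ≤ cs.length then
        if isValid ((cs.drop st).take (e - st)) then
          loopA cs f st (e + 1)
            (if L.length < ((cs.drop st).take (e - st)).length
             then (cs.drop st).take (e - st) else L)
        else loopA cs f (st + 1) e L
      else L := rfl

theorem loopA_exit (cs : List Char) (f st e : Nat) (L : List Char) (h : cs.length < e) :
    loopA cs f st e L = L := by
  cases f
  · rfl
  · rw [loopA_succ, if_neg (by omega)]

theorem tri_eq (x y z : Char) :
    (((x == 'a') && ((y == 'a') && (z == 'a'))) || ((x == 'b') && ((y == 'b') && (z == 'b'))))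
    = (x == y && y == z && (x == 'a' || x == 'b')) := by
  rw [Bool.eq_iff_iff]
  simp only [Bool.or_eq_true, Bool.and_eq_true, beq_iff_eq]
  constructor
  · rintro (⟨rfl, rfl, rfl⟩ | ⟨rfl, rfl, rfl⟩) <;> simp
  · rintro ⟨⟨rfl, rfl⟩, (rfl | rfl)⟩ <;> simp

theorem isValidLoop_true_iff (w : List Char) :
    ∀ f st, w.length ≤ f + st + 2 →
      (isValidLoop w f st (st + 3) = true ↔
        ∀ j, st ≤ j → j + 3 ≤ w.length → badB w j = false) := by
  intro f
  induction f with
  | zero =>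
    intro st hst
    simp only [isValidLoop, true_iff]
    intro j hj hj3
    exfalso; omega
  | succ f ih =>
    intro st hst
    rw [isValidLoop_succ]
    by_cases h : st + 3 ≤ w.length
    · rw [if_pos h]
      have h0 : st < w.length := by omega
      have h1 : st + 1 < w.length := by omega
      have h2 : st + 2 < w.length := by omega
      have htake : (w.drop st).take (st + 3 - st) = [w[st], w[st + 1], w[st + 2]] := by
        rw [show st + 3 - st = 3 from by omega, List.drop_eq_getElem_cons h0,
          List.drop_eq_getElem_cons h1, List.drop_eq_getElem_cons h2]
        rfl
      have hbadeq : badB w st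
          = (w[st] == w[st + 1] && w[st + 1] == w[st + 2] && (w[st] == 'a' || w[st] == 'b')) := by
        unfold badB
        rw [List.getElem?_eq_getElem h0, List.getElem?_eq_getElem h1, List.getElem?_eq_getElem h2]
      have hcond : ((((w.drop st).take (st + 3 - st)).map (fun c => c == 'a')).all id
          || (((w.drop st).take (st + 3 - st)).map (fun c => c == 'b')).all id) = badB w st := by
        rw [htake, hbadeq]
        simp only [List.map_cons, List.map_nil, List.all_cons, List.all_nil, id_eq, Bool.and_true]
        exact tri_eq w[st] w[st + 1] w[st + 2]
      rw [hcond]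
      cases hb : badB w st
      · rw [if_neg (by simp)]
        rw [show st + 3 + 1 = (st + 1) + 3 from by omega]
        rw [ih (st + 1) (by omega)]
        constructor
        · intro hall j hj hj3
          rcases Nat.eq_or_lt_of_le hj with hje | hjl
          · rw [← hje]; exact hb
          · exact hall j (by omega) hj3
        · intro hall j hj hj3
          exact hall j (by omega) hj3
      · rw [if_pos rfl]
        simp only [Bool.false_eq_true, false_iff]
        intro hall
        have := hall st (le_refl st) h
        rw [hb] at this
        exact Bool.true_eq_false.mp this
    · rw [if_neg h]
      simp only [true_iff]
      intro j hj hj3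
      exact absurd (show st + 3 ≤ w.length by omega) h

theorem badB_window (cs : List Char) (a e j : Nat) (hj : j + 3 ≤ e - a) :
    badB ((cs.drop a).take (e - a)) j = badB cs (a + j) := by
  unfold badB
  rw [List.getElem?_take_of_lt (show j < e - a by omega),
    List.getElem?_take_of_lt (show j + 1 < e - a by omega),
    List.getElem?_take_of_lt (show j + 2 < e - a by omega),
    List.getElem?_drop, List.getElem?_drop, List.getElem?_drop]
  rw [show a + (j + 1) = a + j + 1 from rfl, show a + (j + 2) = a + j + 2 from rfl]

theorem isValid_window (cs : List Char) (a e : Nat) (hae : a ≤ e) (hel : e ≤ cs.length) :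
    isValid ((cs.drop a).take (e - a)) = true ↔ Good cs a e := by
  have hlen : ((cs.drop a).take (e - a)).length = e - a := by
    simp; omega
  unfold isValid
  rw [hlen]
  by_cases h2 : e - a ≤ 2
  · rw [if_pos h2]
    simp only [true_iff]
    intro j hj hj3
    exfalso; omega
  · rw [if_neg h2]
    rw [show (3 : Nat) = 0 + 3 from rfl, isValidLoop_true_iff _ _ 0 (by rw [hlen]; omega)]
    rw [hlen]
    constructor
    · intro hall j hj hj3
      have := hall (j - a) (by omega) (by omega)
      rw [badB_window cs a e (j - a) (by omega),
        show a + (j - a) = j from by omega] at this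
      exact this
    · intro hg j _ hj3
      rw [badB_window cs a e j (by omega)]
      exact hg (a + j) (by omega) (by omega)

theorem chainA (cs : List Char) (E : Nat) (L : List Char)
    (hE3 : 3 ≤ E) (hEl : E ≤ cs.length) (hbad : badB cs (E - 3) = true) :
    ∀ k st f, st + k + 2 = E → k ≤ f →
      loopA cs f st E L = loopA cs (f - k) (E - 2) E L := by
  intro k
  induction k with
  | zero =>
    intro st f hst _
    rw [show st = E - 2 from by omega, Nat.sub_zero]
  | succ k ih =>
    intro st f hst hk
    obtain ⟨f', rfl⟩ : ∃ f', f = f' + 1 := ⟨f - 1, by omega⟩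
    have hval : isValid ((cs.drop st).take (E - st)) = false := by
      cases hv : isValid ((cs.drop st).take (E - st))
      · rfl
      · exfalso
        have hg := (isValid_window cs st E (by omega) hEl).mp hv
        have := hg (E - 3) (by omega) (by omega)
        rw [hbad] at this
        exact Bool.true_eq_false.mp this
    rw [loopA_succ, if_pos hEl, if_neg (by simp [hval]),
      show f' + 1 - (k + 1) = f' - k from by omega]
    exact ih (st + 1) f' (by omega) (by omega)

theorem mainLem (cs : List Char) (f e st bs bl : Nat)
    (hel : e ≤ cs.length) (hse : st ≤ e) (hbb : bs + bl ≤ cs.length)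
    (hf : 2 * (cs.length + 1 - e) + (e - st) ≤ f)
    (hg : Good cs st e) :
    loopA cs f st e ((cs.drop bs).take bl) =
      ((cs.drop ((List.range' e (cs.length - e)).foldl (stepB cs)
          (st, if bl < e - st then (st, e - st) else (bs, bl))).2.1).take
        ((List.range' e (cs.length - e)).foldl (stepB cs)
          (st, if bl < e - st then (st, e - st) else (bs, bl))).2.2) := by
  obtain ⟨f', rfl⟩ : ∃ f', f = f' + 1 := ⟨f - 1, by omega⟩
  have hwinlen : ((cs.drop st).take (e - st)).length = e - st := by simp; omega
  have hloneq : ((cs.drop bs).take bl).length = bl := by simp; omega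
  rw [loopA_succ, if_pos hel, if_pos ((isValid_window cs st e hse hel).mpr hg)]
  rw [hloneq, hwinlen]
  have haux : ∀ bs2 bl2, bs2 + bl2 ≤ cs.length →
      loopA cs f' st (e + 1) ((cs.drop bs2).take bl2) =
        ((cs.drop ((List.range' e (cs.length - e)).foldl (stepB cs) (st, bs2, bl2)).2.1).take
          ((List.range' e (cs.length - e)).foldl (stepB cs) (st, bs2, bl2)).2.2) := by
    intro bs2 bl2 hbb2
    by_cases hlt : e < cs.length
    · rw [show cs.length - e = (cs.length - (e + 1)) + 1 from by omega, List.range'_succ,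
        List.foldl_cons]
      have hstep : stepB cs (st, bs2, bl2) e =
          (nextStart cs e st,
           if bl2 < e - nextStart cs e st + 1
           then (nextStart cs e st, e - nextStart cs e st + 1) else (bs2, bl2)) := rfl
      by_cases hC : 2 ≤ e - st ∧ badB cs (e - 2) = true
      · have hst' : nextStart cs e st = e - 1 := if_pos hC
        have hA : loopA cs f' st (e + 1) ((cs.drop bs2).take bl2)
            = loopA cs (f' - (e - 1 - st)) (e - 1) (e + 1) ((cs.drop bs2).take bl2) := by
          have hch := chainA cs (e + 1) ((cs.drop bs2).take bl2) (by omega) (by omega)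
            (by rw [show e + 1 - 3 = e - 2 from by omega]; exact hC.2)
            (e - 1 - st) st f' (by omega) (by omega)
          rw [show e + 1 - 2 = e - 1 from by omega] at hch
          exact hch
        have hIH := mainLem cs (f' - (e - 1 - st)) (e + 1) (e - 1) bs2 bl2 (by omega) (by omega)
          hbb2 (by omega) (by intro j hj hj3; exfalso; omega)
        rw [hstep, hst', hA, hIH,
          show e - (e - 1) + 1 = e + 1 - (e - 1) from by have := hC.1; omega]
      · have hst' : nextStart cs e st = st := if_neg hC
        have hg' : Good cs st (e + 1) := by
          intro j hj hj3
          by_cases hje : j + 3 ≤ e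
          · exact hg j hj hje
          · have hje2 : j = e - 2 := by omega
            cases hb : badB cs (e - 2)
            · rw [hje2]; exact hb
            · exfalso; exact hC ⟨by omega, hb⟩
        have hIH := mainLem cs f' (e + 1) st bs2 bl2 (by omega) (by omega) hbb2 (by omega) hg'
        rw [hstep, hst', hIH, show e - st + 1 = e + 1 - st from by omega]
    · rw [show cs.length - e = 0 from by omega]
      rw [loopA_exit cs f' st (e + 1) _ (by omega)]
      rfl
  by_cases hupd : bl < e - st
  · rw [if_pos hupd, if_pos hupd]
    exact haux st (e - st) (by omega)
  · rw [if_neg hupd, if_neg hupd]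
    exact haux bs bl hbb
termination_by cs.length - e
decreasing_by all_goals omega

-- ===== VERDICT (by name: the statement is the Claim_ definition above) =====
theorem longestValidString_spec : Claim_equal_longestValidString := by
  intro s _
  unfold Spec_longestValidString longestValidString longestValidString_alt
  by_cases h : s.toList = []
  · rw [if_pos h, h]
    rfl
  · rw [if_neg h]
    have hlen : 1 ≤ s.toList.length := by
      have := List.length_pos_iff.mpr h
      omega
    have hA0 : loopA s.toList (2 * s.toList.length + 2) 0 0 []
        = loopA s.toList (2 * s.toList.length + 1) 0 1 [] := by
      rw [show 2 * s.toList.length + 2 = (2 * s.toList.length + 1) + 1 from rfl,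
        loopA_succ, if_pos (by omega)]
      simp [isValid]
    have hmain := mainLem s.toList (2 * s.toList.length + 1) 1 0 0 0 hlen (by omega) (by omega)
      (by omega) (by intro j hj hj3; exfalso; omega)
    rw [if_pos (by omega : (0:Nat) < 1 - 0)] at hmain
    simp only [List.drop_zero, List.take_zero] at hmain
    have hB0 : (List.range s.toList.length).foldl (stepB s.toList) (0, 0, 0)
        = (List.range' 1 (s.toList.length - 1)).foldl (stepB s.toList) (0, 0, 1) := by
      rw [List.range_eq_range', show s.toList.length = (s.toList.length - 1) + 1 from by omega,
        List.range'_succ, List.foldl_cons,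
        show (s.toList.length - 1) + 1 - 1 = s.toList.length - 1 from by omega]
      have hns : nextStart s.toList 0 0 = 0 := by
        unfold nextStart
        rw [if_neg (by intro hc; omega)]
      have : stepB s.toList (0, 0, 0) 0 = (0, 0, 1) := by
        unfold stepB
        rw [hns]
        simp
      rw [this]
    rw [show (1 : Nat) - 0 = 1 from rfl] at hmain
    rw [hA0, hmain, hB0]
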